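-- pv_equiv track=rewrite | github.com/jeevanprakashr/problem-solving | strivers/05_recursion/09_allPatterns.py | anyOneSubSequenceWithSumK
-- ===== SOURCE A (Python) =====
-- def anyOneSubSequenceWithSumK(arr, k):
--     '''
--     No need for all the subsequences as we did above. return the first one
--     for this we use return true/false to break the further recursions
--     '''
--     def copyArr(a):
--         b = []
--         for num in a:
--             b.append(num)
--         return b
--
--     def getSubSequence(idx, total, comb):
--         if idx == n:
--             if total == k:
--                 res.append(copyArr(comb))
--                 return True
--             return False
--         comb.append(arr[idx])
--         if getSubSequence(idx + 1, total + arr[idx], comb):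
--             return True
--         comb.pop()
--         if getSubSequence(idx + 1, total, comb):
--             return True
--         return False
--
--     n = len(arr)
--     res = []
--     getSubSequence(0, 0, [])
--     return res
--
-- arr = [1, 2, 1]
--
-- k = 2
-- ===== SOURCE B (Python) =====
-- def anyOneSubSequenceWithSumK(arr, k):
--     def helper(idx, total):
--         if idx == len(arr):
--             return [] if total == k else None
--         inc = helper(idx + 1, total + arr[idx])
--         if inc is not None:
--             return [arr[idx]] + inc
--         return helper(idx + 1, total)
--
--     r = helper(0, 0)
--     return [r] if r is not None else []
-- ===== Notes on version B (the rewrite author's own statement) =====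
-- stated objective: simpler
-- what changed: Replaces the bool-returning DFS that mutates a shared accumulator list and a result list (with an explicit copy helper) by a pure helper returning the found subsequence directly as Optional[list], built by prepending on the way back; same include-first search order, no mutation or copying.
import Mathlib
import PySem

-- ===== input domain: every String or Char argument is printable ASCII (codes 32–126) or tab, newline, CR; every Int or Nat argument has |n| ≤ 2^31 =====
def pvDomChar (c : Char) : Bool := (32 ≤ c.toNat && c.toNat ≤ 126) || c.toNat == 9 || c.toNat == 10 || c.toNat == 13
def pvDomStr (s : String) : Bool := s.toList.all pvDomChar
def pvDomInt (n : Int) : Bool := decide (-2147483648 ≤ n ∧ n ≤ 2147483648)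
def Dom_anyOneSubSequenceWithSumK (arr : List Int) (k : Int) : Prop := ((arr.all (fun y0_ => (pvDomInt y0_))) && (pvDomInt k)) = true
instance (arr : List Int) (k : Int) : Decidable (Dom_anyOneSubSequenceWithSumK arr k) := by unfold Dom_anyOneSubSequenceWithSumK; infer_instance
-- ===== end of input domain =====

-- ===== PORT A =====
-- B changes: pure Optional-returning helper instead of A's bool DFS mutating a shared
-- accumulator plus a result list; same search order, no mutation (objective: simpler).
-- A's getSubSequence(idx, total, comb): the index idx into arr is represented by the
-- remaining suffix arr[idx:] (idx == n ↔ suffix empty, arr[idx] = head); comb.append/pop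
-- around the first recursive call becomes passing comb ++ [x] to it; the pair's Bool is
-- the returned flag and the List (List Int) is what got appended to res.
def aGetSubSequence (k : Int) (rest : List Int) (total : Int) (comb : List Int) :
    Bool × List (List Int) :=
  match rest with
  | [] => if total == k then (true, [comb]) else (false, [])
  | x :: rs =>
    let r1 := aGetSubSequence k rs (total + x) (comb ++ [x])
    if r1.1 then r1
    else
      let r2 := aGetSubSequence k rs total comb
      if r2.1 then r2 else (false, [])

def anyOneSubSequenceWithSumK (arr : List Int) (k : Int) : List (List Int) :=
  (aGetSubSequence k arr 0 []).2

-- ===== PORT B =====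
-- B's helper(idx, total): idx again represented by the remaining suffix arr[idx:].
def bHelper (k : Int) (rest : List Int) (total : Int) : Option (List Int) :=
  match rest with
  | [] => if total == k then some [] else none
  | x :: rs =>
    match bHelper k rs (total + x) with
    | some inc => some (x :: inc)
    | none => bHelper k rs total

def anyOneSubSequenceWithSumK_alt (arr : List Int) (k : Int) : List (List Int) :=
  match bHelper k arr 0 with
  | some r => [r]
  | none => []

-- ===== PRECONDITION & SPEC =====
def Spec_anyOneSubSequenceWithSumK (arr : List Int) (k : Int) (out : List (List Int)) : Prop := out = anyOneSubSequenceWithSumK_alt arr k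
instance (arr : List Int) (k : Int) (out : List (List Int)) : Decidable (Spec_anyOneSubSequenceWithSumK arr k out) := by unfold Spec_anyOneSubSequenceWithSumK; infer_instance

-- ===== CLAIM (what is proved, stated in full; the proofs are below) =====
def Claim_equal_anyOneSubSequenceWithSumK : Prop := ∀ (arr : List Int) (k : Int), Dom_anyOneSubSequenceWithSumK arr k → Spec_anyOneSubSequenceWithSumK arr k (anyOneSubSequenceWithSumK arr k)

-- ===== LEMMAS AND PROOFS =====
theorem aGo_eq_bHelper (k : Int) (rest : List Int) (total : Int) (comb : List Int) :
    aGetSubSequence k rest total comb =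
      match bHelper k rest total with
      | some r => (true, [comb ++ r])
      | none => (false, []) := by
  induction rest generalizing total comb with
  | nil =>
    simp only [aGetSubSequence, bHelper]
    by_cases h : total == k <;> simp [h]
  | cons x rs ih =>
    simp only [aGetSubSequence, bHelper, ih]
    cases h1 : bHelper k rs (total + x) with
    | some inc => simp [List.append_assoc]
    | none =>
      cases h2 : bHelper k rs total with
      | some r => simp
      | none => simp

-- ===== VERDICT (by name: the statement is the Claim_ definition above) =====
theorem anyOneSubSequenceWithSumK_spec : Claim_equal_anyOneSubSequenceWithSumK := by
  intro arr k _
  unfold Spec_anyOneSubSequenceWithSumK anyOneSubSequenceWithSumK anyOneSubSequenceWithSumK_alt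
  rw [aGo_eq_bHelper]
  cases bHelper k arr 0 <;> simp
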